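-- pv_equiv track=rewrite | github.com/MrBrantCode/unitest_baseline | mut_generate/mist_train_cf/cf_44345/solution.py | count
-- ===== SOURCE A (Python) =====
-- def count(x, y, z, n):
--     if n == 0:
--         return 1
--     if (x-2**(n-1))**2 + (y-2**(n-1))**2 + (z-2**(n-1))**2 <= 2**(3*n-3):
--         if (x+1)**2 + y**2 + z**2 <= 2**(3*n-3):
--             return 2
--         else:
--             return 1 + 8*count(x,y,z,n-1)
--     elif (x+2**(n-1))**2 + (y+2**(n-1))**2 + (z+2**(n-1))**2 > 2**(3*n-3):
--         return 2
--     else: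
--         return 1 + 8*count(x,y,z,n-1)
-- ===== SOURCE B (Python) =====
-- def count(x, y, z, n):
--     # Two phases: find the first recursion depth t at which an early-return fires,
--     # then return the closed-form 1+8+...+8^(t-1) + 2*8^t (or the full geometric
--     # sum 1+8+...+8^n if the recursion bottoms out at n == 0).
--     for t, k in enumerate(range(n - 1, -1, -1)):
--         m, r = 2 ** k, 8 ** k
--         if (x - m) ** 2 + (y - m) ** 2 + (z - m) ** 2 <= r:
--             stop = (x + 1) ** 2 + y ** 2 + z ** 2 <= r
--         else:
--             stop = (x + m) ** 2 + (y + m) ** 2 + (z + m) ** 2 > r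
--         if stop:
--             return (8 ** t - 1) // 7 + 2 * 8 ** t
--     return (8 ** (n + 1) - 1) // 7
-- ===== Notes on version B (the rewrite author's own statement) =====
-- stated objective: alternative
-- what changed: Replaces the 1 + 8*count(n-1) recursion by a two-phase algorithm: a loop that only searches for the first depth t at which an early-return condition fires, then a closed-form geometric sum (8**t - 1)//7 + 2*8**t (or (8**(n+1)-1)//7 if none fires).
-- outside the precondition, e.g. on count(0, 0, 0, -1): A returns 2, B returns 0
import Mathlib
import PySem

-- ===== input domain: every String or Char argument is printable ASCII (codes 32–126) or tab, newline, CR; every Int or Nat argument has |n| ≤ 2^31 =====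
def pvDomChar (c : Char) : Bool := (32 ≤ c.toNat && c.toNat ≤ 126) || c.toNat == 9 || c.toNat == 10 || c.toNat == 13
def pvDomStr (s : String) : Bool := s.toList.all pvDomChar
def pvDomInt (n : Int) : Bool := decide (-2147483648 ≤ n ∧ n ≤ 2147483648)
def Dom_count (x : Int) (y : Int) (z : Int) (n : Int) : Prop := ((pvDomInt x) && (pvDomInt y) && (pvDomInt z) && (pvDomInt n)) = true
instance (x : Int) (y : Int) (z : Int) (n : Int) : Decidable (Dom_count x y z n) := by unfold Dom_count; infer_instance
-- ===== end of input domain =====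

-- B replaces A's 1 + 8*f(n-1) recursion by a two-phase algorithm: first a search for
-- the depth at which an early-return fires, then a closed-form geometric sum.

-- ===== PORT A =====
-- A recurses on n-1; for n ≥ 0 this is recursion on the natural number n.toNat
-- (for n ≥ 1, 2**(n-1) = 2^k and 2**(3n-3) = 2^(3k) with k = n.toNat - 1).
def countAuxA (x y z : Int) : Nat → Int
  | 0 => 1
  | k + 1 =>
    let m : Int := 2 ^ k
    let r : Int := 2 ^ (3 * k)
    if (x - m) ^ 2 + (y - m) ^ 2 + (z - m) ^ 2 ≤ r then
      if (x + 1) ^ 2 + y ^ 2 + z ^ 2 ≤ r then 2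
      else 1 + 8 * countAuxA x y z k
    else if (x + m) ^ 2 + (y + m) ^ 2 + (z + m) ^ 2 > r then 2
    else 1 + 8 * countAuxA x y z k

-- For n < 0 Python evaluates the conditions with float powers 2**(n-1); for integer
-- coordinates these floats select the 'elif' branch, which returns 2 (hand-ported, exact
-- except where Python underflows to 0.0 and recurses into RecursionError — there A
-- returns nothing, and nothing is claimed: Pre_count excludes all n < 0).
def count (x : Int) (y : Int) (z : Int) (n : Int) : Int :=
  if n < 0 then 2 else countAuxA x y z n.toNat

-- ===== PORT B =====
-- Source B's stop test at exponent level k (k = n-1-t in the Python loop).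
def stopB (x y z : Int) (k : Nat) : Bool :=
  let m : Int := 2 ^ k
  let r : Int := 8 ^ k
  if (x - m) ^ 2 + (y - m) ^ 2 + (z - m) ^ 2 ≤ r then
    decide ((x + 1) ^ 2 + y ^ 2 + z ^ 2 ≤ r)
  else
    decide ((x + m) ^ 2 + (y + m) ^ 2 + (z + m) ^ 2 > r)

-- Source B's search loop: k runs down from n-1 to 0 while t counts up from 0; returns the
-- first t whose level stops, or none if the loop falls through.
def searchB (x y z : Int) : Nat → Nat → Option Nat
  | 0, _ => none
  | k + 1, t => if stopB x y z k then some t else searchB x y z k (t + 1)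

def count_alt (x : Int) (y : Int) (z : Int) (n : Int) : Int :=
  match searchB x y z n.toNat 0 with
  | some t => PySem.Int.floordiv (8 ^ t - 1) 7 + 2 * 8 ^ t
  | none => PySem.Int.floordiv (8 ^ (n.toNat + 1) - 1) 7

-- ===== PRECONDITION & SPEC =====
-- Pre_ excludes negative n: there A evaluates its conditions with the fractional float
-- powers 2**(n-1), leaving integer arithmetic; its value there (2) is an artefact of
-- Python float semantics outside the recursion's natural domain (n is a depth).
def Pre_count (x : Int) (y : Int) (z : Int) (n : Int) : Prop := 0 ≤ n
instance (x : Int) (y : Int) (z : Int) (n : Int) : Decidable (Pre_count x y z n) := by unfold Pre_count; infer_instance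
def pvWitness_count : Int × Int × Int × Int := (0, 0, 0, 2)

def Spec_count (x : Int) (y : Int) (z : Int) (n : Int) (out : Int) : Prop := out = count_alt x y z n
instance (x : Int) (y : Int) (z : Int) (n : Int) (out : Int) : Decidable (Spec_count x y z n out) := by unfold Spec_count; infer_instance

-- ===== CLAIM (what is proved, stated in full; the proofs are below) =====
def Claim_equal_count : Prop := ∀ (x : Int) (y : Int) (z : Int) (n : Int), Dom_count x y z n → Pre_count x y z n → Spec_count x y z n (count x y z n)

-- ===== LEMMAS AND PROOFS =====

-- Exact quotient of the geometric sum: G t = 1 + 8 + … + 8^(t-1) = (8^t - 1)/7.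
def G : Nat → Int
  | 0 => 0
  | t + 1 => 8 * G t + 1

theorem seven_mul_G (t : Nat) : 7 * G t = 8 ^ t - 1 := by
  induction t with
  | zero => simp [G]
  | succ t ih => simp only [G, pow_succ]; linarith

theorem fd_geom (t : Nat) : PySem.Int.floordiv (8 ^ t - 1) 7 = G t := by
  rw [← seven_mul_G, PySem.Int.floordiv_eq_ediv_of_pos (by norm_num)]
  exact Int.mul_ediv_cancel_left _ (by norm_num)

-- The search's running index only offsets the answer.
theorem searchB_shift (x y z : Int) (k : Nat) :
    ∀ t : Nat, searchB x y z k t = (searchB x y z k 0).map (· + t) := by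
  induction k with
  | zero => intro t; simp [searchB]
  | succ k ih =>
    intro t
    simp only [searchB]
    by_cases h : stopB x y z k = true
    · simp [h]
    · simp only [h, ih (t + 1), ih 1]
      cases searchB x y z k 0 <;> simp <;> omega

-- A's recursion computed through B's search result and the geometric sums.
theorem auxA_eq_search (x y z : Int) (k : Nat) :
    countAuxA x y z k =
      (match searchB x y z k 0 with
       | some t => G t + 2 * 8 ^ t
       | none => G (k + 1)) := by
  induction k with
  | zero => simp [countAuxA, searchB, G]
  | succ k ih =>
    have hr : (2 : Int) ^ (3 * k) = 8 ^ k := by rw [pow_mul]; norm_num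
    simp only [countAuxA, searchB, searchB_shift x y z k 1, hr]
    by_cases h1 : (x - 2 ^ k) ^ 2 + (y - 2 ^ k) ^ 2 + (z - 2 ^ k) ^ 2 ≤ (8 : Int) ^ k
    · by_cases h2 : (x + 1) ^ 2 + y ^ 2 + z ^ 2 ≤ (8 : Int) ^ k
      · have hstop : stopB x y z k = true := by simp [stopB, h1, h2]
        simp [h1, h2, hstop, G]
      · have hstop : stopB x y z k = false := by simp [stopB, h1, h2]
        simp only [if_pos h1, if_neg h2, hstop, Bool.false_eq_true, if_false, ih]
        cases searchB x y z k 0 with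
        | none => simp [G]; ring
        | some t => simp [G, pow_succ]; ring
    · by_cases h3 : (x + 2 ^ k) ^ 2 + (y + 2 ^ k) ^ 2 + (z + 2 ^ k) ^ 2 > (8 : Int) ^ k
      · have hstop : stopB x y z k = true := by simp [stopB, h1, h3]
        simp [h1, h3, hstop, G]
      · have hstop : stopB x y z k = false := by simp [stopB, h1, h3]
        simp only [if_neg h1, hstop, Bool.false_eq_true, if_false, ih, gt_iff_lt]
        rw [if_neg (by simpa using h3)]
        cases searchB x y z k 0 with
        | none => simp [G]; ring
        | some t => simp [G, pow_succ]; ring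

-- ===== VERDICT (by name: the statement is the Claim_ definition above) =====
theorem count_spec : Claim_equal_count := by
  intro x y z n _ hpre
  show count x y z n = count_alt x y z n
  rw [count, if_neg (not_lt.mpr hpre), count_alt, auxA_eq_search]
  cases searchB x y z n.toNat 0 <;> simp only [fd_geom]
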